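-- pv_equiv track=rewrite | github.com/adam-does-code/MATH-4600 | tetriminoMove.py | getSurface
-- ===== SOURCE A (Python) =====
-- def getSurface(board):
--     surfaceLevel = [19, 19, 19, 19, 19, 19, 19, 19, 19, 19]
--     i = -1
--     for row in board:
--         i += 1
--         for index in row:
--             if index is not '.':
--                 surfaceLevel[i] = row.index(index)
--                 break
--     return surfaceLevel
-- ===== SOURCE B (Python) =====
-- def getSurface(board):
--     # Column-major sweep: keep a worklist of rows still all-dots so far and
--     # advance one column at a time, resolving rows as their first piece appears.
--     surfaceLevel = [19, 19, 19, 19, 19, 19, 19, 19, 19, 19]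
--     pending = list(range(len(board)))
--     j = 0
--     while pending:
--         still = []
--         for i in pending:
--             row = board[i]
--             if j < len(row):
--                 if row[j] != '.':
--                     surfaceLevel[i] = j
--                 else:
--                     still.append(i)
--         pending = still
--         j += 1
--     return surfaceLevel
-- ===== Notes on version B (the rewrite author's own statement) =====
-- stated objective: alternative
-- what changed: B replaces A's row-major scan (inner break plus a second row.index pass) by a column-major sweep: a worklist of still-all-dots rows is advanced one column at a time, resolving each row the moment its first piece appears.
import Mathlib
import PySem

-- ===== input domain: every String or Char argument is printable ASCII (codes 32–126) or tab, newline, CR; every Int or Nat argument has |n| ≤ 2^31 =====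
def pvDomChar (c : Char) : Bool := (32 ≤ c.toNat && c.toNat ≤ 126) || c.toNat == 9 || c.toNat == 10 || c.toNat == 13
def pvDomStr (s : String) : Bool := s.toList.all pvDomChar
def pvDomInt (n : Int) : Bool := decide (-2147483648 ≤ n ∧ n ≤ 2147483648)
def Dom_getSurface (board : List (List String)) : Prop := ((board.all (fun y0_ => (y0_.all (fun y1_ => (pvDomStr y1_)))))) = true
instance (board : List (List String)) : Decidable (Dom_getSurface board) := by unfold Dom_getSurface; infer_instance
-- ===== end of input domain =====

-- B replaces A's row-by-row scan (inner break + row.index rescan) with a column-major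
-- sweep over a shrinking worklist of unresolved rows (objective: alternative).
-- Python A's `index is not '.'` is `index != '.'` for the interned string '.', ported as ≠ ".".

-- ===== PORT A =====
-- inner `for index in row: if index is not '.': …; break` — returns the first cell ≠ "."
def pvFirstNonDot (row : List String) : Option String :=
  match row with
  | [] => none
  | c :: rest => if c ≠ "." then some c else pvFirstNonDot rest

-- the outer `for row in board` loop, carrying surfaceLevel and the counter i (starts at -1)
def pvALoop (surface : List Int) (i : Int) (board : List (List String)) : List Int :=
  match board with
  | [] => surface
  | row :: rest =>
      let i' := i + 1
      let surface' :=
        match pvFirstNonDot row with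
        | none => surface
        | some c => surface.set i'.toNat (((PySem.List.index? row c).getD 0 : Nat) : Int)
      pvALoop surface' i' rest

def getSurface (board : List (List String)) : List Int :=
  pvALoop [19, 19, 19, 19, 19, 19, 19, 19, 19, 19] (-1) board

-- ===== PORT B =====
-- one step of the inner `for i in pending:` loop of Source B, folding over (surfaceLevel, still)
def pvInner (board : List (List String)) (j : Nat) (st : List Int × List Nat) (i : Nat) :
    List Int × List Nat :=
  let row := board.getD i []
  if j < row.length then
    if row.getD j "" ≠ "." then (st.1.set i ((j : Nat) : Int), st.2)
    else (st.1, st.2 ++ [i])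
  else st

-- the rows the inner loop keeps pending: column j exists and holds "."
def pvStillP (board : List (List String)) (j : Nat) (i : Nat) : Bool :=
  decide (j < (board.getD i []).length) && decide ((board.getD i []).getD j "" = ".")

-- the `still` list produced by one inner loop is the pvStillP-filter of `pending`
theorem pvInner_snd (board : List (List String)) (j : Nat) :
    ∀ (pending : List Nat) (s : List Int) (acc : List Nat),
      (pending.foldl (pvInner board j) (s, acc)).2 = acc ++ pending.filter (pvStillP board j) := by
  intro pending
  induction pending with
  | nil => intro s acc; simp
  | cons a t ih =>
      intro s acc
      rw [List.foldl_cons]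
      by_cases hlen : j < (board.getD a []).length
      · by_cases hget : (board.getD a []).getD j "" = "."
        · have hstep : pvInner board j (s, acc) a = (s, acc ++ [a]) := by
            simp only [pvInner]
            rw [if_pos hlen, if_neg (fun h => h hget)]
          have hp : pvStillP board j a = true := by
            unfold pvStillP
            rw [decide_eq_true hlen, decide_eq_true hget]
            rfl
          rw [hstep, ih, List.filter_cons, hp, if_pos rfl, List.append_assoc,
            List.singleton_append]
        · have hstep : pvInner board j (s, acc) a = (s.set a ((j : Nat) : Int), acc) := by
            simp only [pvInner]
            rw [if_pos hlen, if_pos hget]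
          have hp : pvStillP board j a = false := by
            unfold pvStillP
            rw [decide_eq_false hget, Bool.and_false]
          rw [hstep, ih, List.filter_cons, hp, if_neg Bool.false_ne_true]
      · have hstep : pvInner board j (s, acc) a = (s, acc) := by
          simp only [pvInner]
          rw [if_neg hlen]
        have hp : pvStillP board j a = false := by
          unfold pvStillP
          rw [decide_eq_false hlen, Bool.false_and]
        rw [hstep, ih, List.filter_cons, hp, if_neg Bool.false_ne_true]

-- termination measure bookkeeping for the while loop
theorem pvMeasure_aux (board : List (List String)) (j : Nat) :
    ∀ (t : List Nat),
      (t.filter (pvStillP board j)).length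
        + ((t.filter (pvStillP board j)).map (fun i => (board.getD i []).length - (j + 1))).sum
      ≤ t.length + ((t.map (fun i => (board.getD i []).length - j)).sum) := by
  intro t
  induction t with
  | nil => simp
  | cons a t ih =>
      rw [List.filter_cons]
      cases hp : pvStillP board j a with
      | true =>
          rw [if_pos rfl]
          simp only [List.length_cons, List.map_cons, List.sum_cons]
          have : (board.getD a []).length - (j + 1) ≤ (board.getD a []).length - j := by omega
          omega
      | false =>
          rw [if_neg Bool.false_ne_true]
          simp only [List.length_cons, List.map_cons, List.sum_cons]
          omega

theorem pvMeasure_lt (board : List (List String)) (j : Nat) (pending : List Nat)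
    (h : pending ≠ []) :
    (pending.filter (pvStillP board j)).length
      + ((pending.filter (pvStillP board j)).map (fun i => (board.getD i []).length - (j + 1))).sum
    < pending.length + ((pending.map (fun i => (board.getD i []).length - j)).sum) := by
  cases pending with
  | nil => exact absurd rfl h
  | cons a t =>
      rw [List.filter_cons]
      have haux := pvMeasure_aux board j t
      cases hp : pvStillP board j a with
      | true =>
          rw [if_pos rfl]
          simp only [List.length_cons, List.map_cons, List.sum_cons]
          have hlt : j < (board.getD a []).length := by
            by_contra hlt
            unfold pvStillP at hp
            rw [decide_eq_false hlt, Bool.false_and] at hp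
            exact Bool.false_ne_true hp
          have : (board.getD a []).length - (j + 1) < (board.getD a []).length - j := by omega
          omega
      | false =>
          rw [if_neg Bool.false_ne_true]
          simp only [List.length_cons, List.map_cons, List.sum_cons]
          omega

-- the `while pending:` loop of Source B
def pvSweep (board : List (List String)) (surface : List Int) (pending : List Nat) (j : Nat) :
    List Int :=
  if h : pending = [] then surface
  else
    let st := pending.foldl (pvInner board j) (surface, [])
    pvSweep board st.1 st.2 (j + 1)
termination_by pending.length + ((pending.map (fun i => (board.getD i []).length - j)).sum)
decreasing_by
  simp only [List.foldl_attach]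
  have hsnd := pvInner_snd board j pending surface []
  simp only [List.nil_append] at hsnd
  rw [hsnd]
  exact pvMeasure_lt board j pending h

def getSurface_alt (board : List (List String)) : List Int :=
  pvSweep board [19, 19, 19, 19, 19, 19, 19, 19, 19, 19] (List.range board.length) 0

-- ===== PRECONDITION & SPEC =====
-- Pre_ excludes exactly the boards on which Python A raises IndexError: a row at index ≥ 10
-- containing a non-'.' cell makes A assign surfaceLevel[i] out of range (B raises there too).
def Pre_getSurface (board : List (List String)) : Prop :=
  ∀ row ∈ board.drop 10, ∀ c ∈ row, c = "."
instance (board : List (List String)) : Decidable (Pre_getSurface board) := by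
  unfold Pre_getSurface; infer_instance

def pvWitness_getSurface : List (List String) := [[".", "x"], ["y"]]

def Spec_getSurface (board : List (List String)) (out : List Int) : Prop := out = getSurface_alt board
instance (board : List (List String)) (out : List Int) : Decidable (Spec_getSurface board out) := by unfold Spec_getSurface; infer_instance

-- ===== CLAIM (what is proved, stated in full; the proofs are below) =====
def Claim_equal_getSurface : Prop := ∀ (board : List (List String)), Dom_getSurface board → Pre_getSurface board → Spec_getSurface board (getSurface board)

-- ===== LEMMAS AND PROOFS =====

-- proof-side: the first non-dot column of a row (none if all dots)
def pvFirst? (row : List String) : Option Nat :=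
  match row with
  | [] => none
  | c :: rest => if c ≠ "." then some 0 else (pvFirst? rest).map (· + 1)

-- proof-side: first non-dot column with running offset, default 19
def pvFirstIdx (row : List String) (j : Int) : Int :=
  match row with
  | [] => 19
  | c :: rest => if c ≠ "." then j else pvFirstIdx rest (j + 1)

-- the common characterisation both ports are reduced to
def pvF (board : List (List String)) : List Int :=
  ((board.map (fun row => pvFirstIdx row 0)) ++ List.replicate 10 (19 : Int)).take 10

theorem pvFirstIdx_first? (row : List String) :
    ∀ j : Int, pvFirstIdx row j =
      (match pvFirst? row with
       | some k => j + (k : Int)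
       | none => 19) := by
  induction row with
  | nil => intro j; rfl
  | cons c rest ih =>
      intro j
      by_cases hc : c = "."
      · simp only [pvFirstIdx, pvFirst?, hc, ne_eq, not_true_eq_false, if_false, ih (j + 1)]
        cases h : pvFirst? rest with
        | none => simp
        | some k => simp [Option.map]; ring
      · simp [pvFirstIdx, pvFirst?, hc]

theorem pvFirst?_none_of_dots (row : List String) (h : ∀ x ∈ row, x = ".") :
    pvFirst? row = none := by
  induction row with
  | nil => rfl
  | cons c rest ih =>
      have hc : c = "." := h c (by simp)
      simp only [pvFirst?, hc, ne_eq, not_true_eq_false, if_false]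
      rw [ih (fun x hx => h x (by simp [hx]))]
      rfl

theorem pvFirst?_some_at (row : List String) :
    ∀ j : Nat, (∀ x ∈ row.take j, x = ".") → j < row.length →
      row.getD j "" ≠ "." → pvFirst? row = some j := by
  induction row with
  | nil => intro j _ h; simp at h
  | cons c rest ih =>
      intro j hpre hlen hget
      cases j with
      | zero =>
          have hc : c ≠ "." := by simpa [List.getD] using hget
          simp [pvFirst?, hc]
      | succ m =>
          have hc : c = "." := hpre c (by simp [List.take_succ_cons])
          have hpre' : ∀ x ∈ rest.take m, x = "." := by
            intro x hx; exact hpre x (by simp [List.take_succ_cons, hx])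
          have hget' : rest.getD m "" ≠ "." := by
            simpa [List.getD] using hget
          have hlen' : m < rest.length := by simpa using hlen
          simp only [pvFirst?, hc, ne_eq, not_true_eq_false, if_false,
            ih m hpre' hlen' hget']
          rfl

theorem pvFirst?_none_of_short (row : List String) (j : Nat)
    (hpre : ∀ x ∈ row.take j, x = ".") (hlen : row.length ≤ j) :
    pvFirst? row = none := by
  apply pvFirst?_none_of_dots
  intro x hx
  exact hpre x (by rwa [List.take_of_length_le hlen])

theorem pvDots_extend (row : List String) (j : Nat)
    (hpre : ∀ x ∈ row.take j, x = ".") (hlen : j < row.length)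
    (hget : row.getD j "" = ".") :
    ∀ x ∈ row.take (j + 1), x = "." := by
  intro x hx
  rw [List.take_add_one] at hx
  rcases List.mem_append.mp hx with h | h
  · exact hpre x h
  · have : row[j]? = some row[j] := List.getElem?_eq_getElem hlen
    simp only [this, Option.toList] at h
    have hx' : x = row[j] := by simpa using h
    have : row.getD j "" = row[j] := by simp [List.getD, this]
    rw [hx', ← this, hget]

-- the inner loop preserves the surface length
theorem pvInner_fst_length (board : List (List String)) (j : Nat) :
    ∀ (pending : List Nat) (s : List Int) (acc : List Nat),
      ((pending.foldl (pvInner board j) (s, acc)).1).length = s.length := by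
  intro pending
  induction pending with
  | nil => intro s acc; rfl
  | cons a t ih =>
      intro s acc
      rw [List.foldl_cons]
      by_cases hlen : j < (board.getD a []).length
      · by_cases hget : (board.getD a []).getD j "" = "."
        · have hstep : pvInner board j (s, acc) a = (s, acc ++ [a]) := by
            simp only [pvInner]
            rw [if_pos hlen, if_neg (fun h => h hget)]
          rw [hstep, ih]
        · have hstep : pvInner board j (s, acc) a = (s.set a ((j : Nat) : Int), acc) := by
            simp only [pvInner]
            rw [if_pos hlen, if_pos hget]
          rw [hstep, ih]
          simp
      · have hstep : pvInner board j (s, acc) a = (s, acc) := by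
          simp only [pvInner]
          rw [if_neg hlen]
        rw [hstep, ih]

-- pointwise effect of the inner loop on the surface
theorem pvInner_fst_getD (board : List (List String)) (j : Nat) :
    ∀ (pending : List Nat) (s : List Int) (acc : List Nat) (m : Nat), m < s.length →
      ((pending.foldl (pvInner board j) (s, acc)).1).getD m 0 =
        if m ∈ pending ∧ j < (board.getD m []).length ∧ (board.getD m []).getD j "" ≠ "." then
          ((j : Nat) : Int)
        else s.getD m 0 := by
  intro pending
  induction pending with
  | nil => intro s acc m hm; simp
  | cons a t ih =>
      intro s acc m hm
      rw [List.foldl_cons]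
      by_cases hlen : j < (board.getD a []).length
      · by_cases hget : (board.getD a []).getD j "" = "."
        · have hstep : pvInner board j (s, acc) a = (s, acc ++ [a]) := by
            simp only [pvInner]
            rw [if_pos hlen, if_neg (fun h => h hget)]
          rw [hstep, ih s (acc ++ [a]) m hm]
          by_cases hmt : m ∈ t ∧ j < (board.getD m []).length ∧ (board.getD m []).getD j "" ≠ "."
          · rw [if_pos hmt, if_pos ⟨List.mem_cons_of_mem a hmt.1, hmt.2⟩]
          · rw [if_neg hmt]
            by_cases hma : m = a
            · subst hma
              rw [if_neg (fun hc => hc.2.2 hget)]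
            · rw [if_neg (fun hc => by
                rcases List.mem_cons.mp hc.1 with h | h
                · exact hma h
                · exact hmt ⟨h, hc.2⟩)]
        · have hstep : pvInner board j (s, acc) a = (s.set a ((j : Nat) : Int), acc) := by
            simp only [pvInner]
            rw [if_pos hlen, if_pos hget]
          rw [hstep, ih (s.set a ((j : Nat) : Int)) acc m (by simpa using hm)]
          by_cases hmt : m ∈ t ∧ j < (board.getD m []).length ∧ (board.getD m []).getD j "" ≠ "."
          · rw [if_pos hmt, if_pos ⟨List.mem_cons_of_mem a hmt.1, hmt.2⟩]
          · rw [if_neg hmt]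
            by_cases hma : m = a
            · subst hma
              have hv : (s.set m ((j : Nat) : Int)).getD m 0 = ((j : Nat) : Int) := by
                simp [List.getD, hm]
              rw [hv, if_pos ⟨by simp, hlen, hget⟩]
            · have hne : (s.set a ((j : Nat) : Int)).getD m 0 = s.getD m 0 := by
                simp [List.getD, List.getElem?_set_ne (fun h => hma h.symm)]
              rw [hne, if_neg (fun hc => by
                rcases List.mem_cons.mp hc.1 with h | h
                · exact hma h
                · exact hmt ⟨h, hc.2⟩)]
      · have hstep : pvInner board j (s, acc) a = (s, acc) := by
          simp only [pvInner]
          rw [if_neg hlen]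
        rw [hstep, ih s acc m hm]
        by_cases hmt : m ∈ t ∧ j < (board.getD m []).length ∧ (board.getD m []).getD j "" ≠ "."
        · rw [if_pos hmt, if_pos ⟨List.mem_cons_of_mem a hmt.1, hmt.2⟩]
        · rw [if_neg hmt]
          by_cases hma : m = a
          · subst hma
            rw [if_neg (fun hc => hlen hc.2.1)]
          · rw [if_neg (fun hc => by
              rcases List.mem_cons.mp hc.1 with h | h
              · exact hma h
              · exact hmt ⟨h, hc.2⟩)]

theorem pvSweep_length (board : List (List String)) :
    ∀ (pending : List Nat) (j : Nat) (surface : List Int),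
      (pvSweep board surface pending j).length = surface.length := by
  intro pending j surface
  fun_induction pvSweep board surface pending j with
  | case1 => rfl
  | case2 surface pending j h st ih =>
      have hst : st = pending.foldl (pvInner board j) (surface, []) := by
        simp only [st, List.foldl_attach]
      show (pvSweep board (pending.foldl (pvInner board j) (surface, [])).1
          (pending.foldl (pvInner board j) (surface, [])).2 (j + 1)).length = surface.length
      rw [← hst, ih, hst]
      exact pvInner_fst_length board j pending surface []

theorem pvSweep_getD (board : List (List String)) :
    ∀ (pending : List Nat) (j : Nat) (surface : List Int),
      (∀ i ∈ pending, ∀ x ∈ (board.getD i []).take j, x = ".") →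
      (∀ i ∈ pending, pvFirst? (board.getD i []) ≠ none → i < surface.length) →
      ∀ m, m < surface.length →
        (pvSweep board surface pending j).getD m 0 =
          if m ∈ pending then
            (match pvFirst? (board.getD m []) with
             | some k => ((k : Nat) : Int)
             | none => surface.getD m 0)
          else surface.getD m 0 := by
  intro pending j surface
  fun_induction pvSweep board surface pending j with
  | case1 =>
      intro _ _ m hm
      simp
  | case2 surface pending j h st ih =>
      intro hdots hlt m hm
      have hst : st = pending.foldl (pvInner board j) (surface, []) := by
        simp only [st, List.foldl_attach]
      have hsnd : st.2 = pending.filter (pvStillP board j) := by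
        rw [hst, pvInner_snd board j pending surface []]
        rfl
      have hlen1 : st.1.length = surface.length := by
        rw [hst]; exact pvInner_fst_length board j pending surface []
      have hfst : ∀ m' : Nat, m' < surface.length → st.1.getD m' 0 =
          if m' ∈ pending ∧ j < (board.getD m' []).length ∧
              (board.getD m' []).getD j "" ≠ "." then ((j : Nat) : Int)
          else surface.getD m' 0 := by
        intro m' hm'
        rw [hst]; exact pvInner_fst_getD board j pending surface [] m' hm'
      have hPdec : ∀ i : Nat, pvStillP board j i = true →
          j < (board.getD i []).length ∧ (board.getD i []).getD j "" = "." := by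
        intro i hp
        unfold pvStillP at hp
        have h1 := (Bool.and_eq_true _ _).mp hp
        exact ⟨of_decide_eq_true h1.1, of_decide_eq_true h1.2⟩
      have hdots' : ∀ i ∈ st.2, ∀ x ∈ (board.getD i []).take (j + 1), x = "." := by
        intro i hi
        rw [hsnd] at hi
        have hmem := List.mem_filter.mp hi
        obtain ⟨hlen2, hget2⟩ := hPdec i hmem.2
        exact pvDots_extend _ j (hdots i hmem.1) hlen2 hget2
      have hlt' : ∀ i ∈ st.2, pvFirst? (board.getD i []) ≠ none → i < st.1.length := by
        intro i hi hne
        rw [hlen1]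
        rw [hsnd] at hi
        exact hlt i (List.mem_filter.mp hi).1 hne
      have hstep := ih hdots' hlt' m (by rwa [hlen1])
      show (pvSweep board (pending.foldl (pvInner board j) (surface, [])).1
          (pending.foldl (pvInner board j) (surface, [])).2 (j + 1)).getD m 0 = _
      rw [← hst, hstep]
      by_cases hmp : m ∈ pending
      · by_cases hlen2 : j < (board.getD m []).length
        · by_cases hget2 : (board.getD m []).getD j "" = "."
          · -- column j of row m is '.', row stays pending
            have hmem2 : m ∈ st.2 := by
              rw [hsnd]
              refine List.mem_filter.mpr ⟨hmp, ?_⟩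
              unfold pvStillP
              rw [decide_eq_true hlen2, decide_eq_true hget2]
              rfl
            rw [if_pos hmem2, if_pos hmp,
              hfst m hm, if_neg (fun hc => hc.2.2 hget2)]
          · -- column j of row m is the first piece: resolved now at value j
            have hfd : pvFirst? (board.getD m []) = some j :=
              pvFirst?_some_at _ j (hdots m hmp) hlen2 hget2
            have hmem2 : m ∉ st.2 := by
              rw [hsnd]
              intro hc
              exact hget2 (hPdec m (List.mem_filter.mp hc).2).2
            rw [if_neg hmem2, if_pos hmp, hfd,
              hfst m hm, if_pos ⟨hmp, hlen2, hget2⟩]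
        · -- row m exhausted: all dots
          have hfd : pvFirst? (board.getD m []) = none :=
            pvFirst?_none_of_short _ j (hdots m hmp) (by omega)
          have hmem2 : m ∉ st.2 := by
            rw [hsnd]
            intro hc
            exact hlen2 (hPdec m (List.mem_filter.mp hc).2).1
          rw [if_neg hmem2, if_pos hmp, hfd,
            hfst m hm, if_neg (fun hc => hlen2 hc.2.1)]
      · have hmem2 : m ∉ st.2 := by
          rw [hsnd]
          intro hc
          exact hmp (List.mem_filter.mp hc).1
        rw [if_neg hmem2, if_neg hmp, hfst m hm,
          if_neg (fun hc => hmp hc.1)]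

-- ======= A-side lemmas (from the row-wise port) =======

theorem pvFirstNonDot_ne (row : List String) (c : String) :
    pvFirstNonDot row = some c → c ≠ "." := by
  induction row with
  | nil => simp [pvFirstNonDot]
  | cons x rest ih =>
      simp only [pvFirstNonDot]
      split_ifs with h
      · rintro h'; cases h'; exact h
      · exact ih

theorem pvFirstIdx_eq (row : List String) (c : String) (h : pvFirstNonDot row = some c) :
    ∀ j : Int, ∃ k : Nat, PySem.List.index? row c = some k ∧ pvFirstIdx row j = j + (k : Int) := by
  induction row with
  | nil => simp [pvFirstNonDot] at h
  | cons x rest ih =>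
      intro j
      simp only [pvFirstNonDot] at h
      by_cases hx : x = "."
      · simp only [hx, ne_eq, not_true_eq_false, if_false] at h
        obtain ⟨k, hk, hidx⟩ := ih h (j + 1)
        have hne : x ≠ c := by rw [hx]; exact (pvFirstNonDot_ne rest c h).symm
        refine ⟨k + 1, ?_, ?_⟩
        · rw [PySem.List.index?_cons_of_ne rest hne, hk]; rfl
        · simp [pvFirstIdx, hx, hidx]; ring
      · simp only [ne_eq, hx, not_false_eq_true, if_true, Option.some.injEq] at h
        subst h
        exact ⟨0, PySem.List.index?_cons_self x rest, by simp [pvFirstIdx, hx]⟩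

theorem pvFirstIdx_none (row : List String) (h : pvFirstNonDot row = none) :
    ∀ j : Int, pvFirstIdx row j = 19 := by
  induction row with
  | nil => intro j; rfl
  | cons x rest ih =>
      intro j
      simp only [pvFirstNonDot] at h
      by_cases hx : x = "."
      · simp only [hx, ne_eq, not_true_eq_false, if_false] at h
        simp [pvFirstIdx, hx, ih h]
      · simp [hx] at h

-- merge: what A's loop does to the suffix of surfaceLevel starting at the current row index
def pvMerge (s : List Int) (board : List (List String)) : List Int :=
  match s, board with
  | s, [] => s
  | [], _ => []
  | x :: s, row :: rest =>
      (match pvFirstNonDot row with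
       | none => x
       | some c => (((PySem.List.index? row c).getD 0 : Nat) : Int)) :: pvMerge s rest

theorem pvMerge_nil (board : List (List String)) : pvMerge [] board = [] := by
  cases board <;> rfl

theorem pvALoop_eq (board : List (List String)) :
    ∀ (s : List Int) (j : Nat),
      pvALoop s ((j : Int) - 1) board = s.take j ++ pvMerge (s.drop j) board := by
  induction board with
  | nil =>
      intro s j
      simp [pvALoop, pvMerge]
  | cons row rest ih =>
      intro s j
      have hj : ((j : Int) - 1 + 1) = ((j + 1 : Nat) : Int) - 1 := by push_cast; ring
      have hjt : ((j : Int) - 1 + 1).toNat = j := by omega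
      cases hdrop : s.drop j with
      | nil =>
          have hlen : s.length ≤ j := by
            have := List.drop_eq_nil_iff.mp hdrop; omega
          have htake : s.take j = s := List.take_of_length_le hlen
          have htake1 : s.take (j + 1) = s := List.take_of_length_le (by omega)
          have hdrop1 : s.drop (j + 1) = [] := List.drop_eq_nil_iff.mpr (by omega)
          cases hfd : pvFirstNonDot row with
          | none =>
              simp only [pvALoop, hfd, hj]
              rw [ih s (j + 1), htake1, hdrop1]
              simp [pvMerge_nil, pvMerge, htake]
          | some c =>
              have hset : s.set ((j : Int) - 1 + 1).toNat
                  (((PySem.List.index? row c).getD 0 : Nat) : Int) = s := by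
                rw [hjt]; exact List.set_eq_of_length_le hlen
              simp only [pvALoop, hfd]
              rw [hset, hj, ih s (j + 1), htake1, hdrop1]
              simp [pvMerge_nil, pvMerge, htake]
      | cons x t =>
          have hlt : j < s.length := by
            by_contra hge
            rw [List.drop_eq_nil_iff.mpr (by omega)] at hdrop; cases hdrop
          have hs : s = s.take j ++ x :: t := by
            conv_lhs => rw [← List.take_append_drop j s, hdrop]
          have hu : (s.take j).length = j := by
            rw [List.length_take]; omega
          have hdrop1 : s.drop (j + 1) = t := by
            rw [← List.drop_drop, hdrop]; rfl
          have htake1 : s.take (j + 1) = s.take j ++ [x] := by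
            conv_lhs => rw [hs]
            rw [List.take_append, List.take_of_length_le (by omega), hu]
            simp
          cases hfd : pvFirstNonDot row with
          | none =>
              simp only [pvALoop, hfd, hj]
              rw [ih s (j + 1), htake1, hdrop1]
              simp [pvMerge, hfd]
          | some c =>
              have hset : s.set ((j : Int) - 1 + 1).toNat
                  (((PySem.List.index? row c).getD 0 : Nat) : Int)
                  = s.take j ++ (((PySem.List.index? row c).getD 0 : Nat) : Int) :: t := by
                rw [hjt]
                conv_lhs => rw [hs]
                rw [List.set_append]
                simp [hu]
              simp only [pvALoop, hfd]
              rw [hset, hj, ih _ (j + 1)]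
              rw [List.take_append, List.take_of_length_le (by omega), hu,
                  List.drop_append, List.drop_of_length_le (by omega), hu]
              simp [pvMerge, hfd]

theorem pvMerge_replicate (board : List (List String)) :
    ∀ n : Nat, pvMerge (List.replicate n (19 : Int)) board =
      ((board.map (fun row => pvFirstIdx row 0)) ++ List.replicate n (19 : Int)).take n := by
  induction board with
  | nil => intro n; simp [pvMerge]
  | cons row rest ih =>
      intro n
      cases n with
      | zero => simp [pvMerge]
      | succ m =>
          have hhead : (match pvFirstNonDot row with
              | none => (19 : Int)
              | some c => (((PySem.List.index? row c).getD 0 : Nat) : Int)) =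
              pvFirstIdx row 0 := by
            cases hfd : pvFirstNonDot row with
            | none => exact (pvFirstIdx_none row hfd 0).symm
            | some c =>
                obtain ⟨k, hk, hidx⟩ := pvFirstIdx_eq row c hfd 0
                rw [PySem.List.index?_eq_idxOf?] at hk
                simp [hk, hidx]
          have htails : ((rest.map (fun row => pvFirstIdx row 0)) ++
                (19 : Int) :: List.replicate m (19 : Int)).take m =
              ((rest.map (fun row => pvFirstIdx row 0)) ++
                List.replicate m (19 : Int)).take m := by
            rw [show ((19 : Int) :: List.replicate m (19 : Int)) =
                  List.replicate (m + 1) (19 : Int) from rfl,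
                List.take_append, List.take_append,
                List.take_replicate, List.take_replicate]
            congr 2
            omega
          rw [List.replicate_succ]
          simp only [pvMerge, List.map_cons, List.cons_append, List.take_succ_cons]
          rw [ih m, hhead, htails]

-- A's port computes pvF
theorem getSurface_eq_pvF (board : List (List String)) :
    getSurface board = pvF board := by
  unfold getSurface pvF
  have h := pvALoop_eq board [19, 19, 19, 19, 19, 19, 19, 19, 19, 19] 0
  simp only [Nat.cast_zero, zero_sub, List.take_zero, List.drop_zero, List.nil_append] at h
  rw [h]
  have : ([19, 19, 19, 19, 19, 19, 19, 19, 19, 19] : List Int) = List.replicate 10 19 := by rfl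
  rw [this, pvMerge_replicate]

-- B's port computes pvF (under Pre_)
theorem getSurface_alt_eq_pvF (board : List (List String)) (hpre : Pre_getSurface board) :
    getSurface_alt board = pvF board := by
  unfold getSurface_alt pvF
  have hrep : ([19, 19, 19, 19, 19, 19, 19, 19, 19, 19] : List Int) = List.replicate 10 19 := rfl
  rw [hrep]
  have hlt0 : ∀ i ∈ List.range board.length, pvFirst? (board.getD i []) ≠ none →
      i < (List.replicate 10 (19 : Int)).length := by
    intro i hi hne
    simp only [List.length_replicate]
    by_contra hge
    have hilen : i < board.length := List.mem_range.mp hi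
    have hgd : board.getD i [] = board[i] := by
      simp [List.getD, List.getElem?_eq_getElem hilen]
    have hdel : i - 10 < (board.drop 10).length := by
      rw [List.length_drop]; omega
    have hmemd : board[i] ∈ board.drop 10 := by
      have : (board.drop 10)[i - 10] = board[i] := by
        rw [List.getElem_drop]
        congr 1
        omega
      rw [← this]
      exact List.getElem_mem hdel
    have hall : ∀ c ∈ board[i], c = "." := hpre board[i] hmemd
    exact hne (by rw [hgd]; exact pvFirst?_none_of_dots _ hall)
  have hdots0 : ∀ i ∈ List.range board.length, ∀ x ∈ (board.getD i []).take 0, x = "." := by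
    intro i _ x hx
    simp at hx
  have hlenL : (pvSweep board (List.replicate 10 (19 : Int)) (List.range board.length) 0).length
      = 10 := by
    rw [pvSweep_length]; simp
  have hlenR : (((board.map (fun row => pvFirstIdx row 0)) ++
      List.replicate 10 (19 : Int)).take 10).length = 10 := by
    simp
  apply List.ext_getElem (by rw [hlenL, hlenR])
  intro m hm1 hm2
  have hm10 : m < 10 := by rwa [hlenL] at hm1
  have hL : (pvSweep board (List.replicate 10 (19 : Int)) (List.range board.length) 0)[m]
      = (pvSweep board (List.replicate 10 (19 : Int)) (List.range board.length) 0).getD m 0 :=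
    (List.getD_eq_getElem _ 0 hm1).symm
  rw [hL,
    pvSweep_getD board (List.range board.length) 0 (List.replicate 10 (19 : Int))
      hdots0 hlt0 m (by simpa using hm10)]
  have hrepD : (List.replicate 10 (19 : Int)).getD m 0 = 19 := by
    have hlt : m < (List.replicate 10 (19 : Int)).length := by simpa using hm10
    rw [List.getD_eq_getElem _ _ hlt, List.getElem_replicate]
  have hm2' : m < ((board.map (fun row => pvFirstIdx row 0)) ++
      List.replicate 10 (19 : Int)).length := by
    simp
    omega
  have hR' : (((board.map (fun row => pvFirstIdx row 0)) ++
        List.replicate 10 (19 : Int)).take 10)[m]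
      = ((board.map (fun row => pvFirstIdx row 0)) ++ List.replicate 10 (19 : Int))[m] :=
    List.getElem_take
  rw [hR', hrepD]
  by_cases hmb : m < board.length
  · have hmem : m ∈ List.range board.length := List.mem_range.mpr hmb
    rw [if_pos hmem]
    have hgd : board.getD m [] = board[m] := by
      simp [List.getD, List.getElem?_eq_getElem hmb]
    have hml : m < (board.map (fun row => pvFirstIdx row 0)).length := by simpa using hmb
    have happ : ((board.map (fun row => pvFirstIdx row 0)) ++
        List.replicate 10 (19 : Int))[m] = pvFirstIdx board[m] 0 := by
      rw [List.getElem_append_left hml, List.getElem_map]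
    rw [happ, pvFirstIdx_first? board[m] 0, hgd]
    cases pvFirst? board[m] with
    | none => rfl
    | some k => simp
  · have hmem : m ∉ List.range board.length := by
      intro hc
      exact hmb (List.mem_range.mp hc)
    rw [if_neg hmem]
    have hml : (board.map (fun row => pvFirstIdx row 0)).length ≤ m := by
      simpa using not_lt.mp hmb
    have happ : ((board.map (fun row => pvFirstIdx row 0)) ++
        List.replicate 10 (19 : Int))[m] = (19 : Int) := by
      rw [List.getElem_append_right hml, List.getElem_replicate]
    rw [happ]

-- ===== VERDICT (by name: the statement is the Claim_ definition above) =====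
theorem getSurface_spec : Claim_equal_getSurface := by
  intro board _ hpre
  unfold Spec_getSurface
  rw [getSurface_eq_pvF, getSurface_alt_eq_pvF board hpre]
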